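-- pv_equiv track=rewrite | github.com/NVIDIA/NeMo | vad_code/src/vad_utils.py | get_vad_stream_status
-- ===== SOURCE A (Python) =====
-- def get_vad_stream_status(data: list) -> list:
--     """
--     Generate a list of status for each snippet in manifest. A snippet should be in single, start, next or end status.
--     Used for concatenating to full audio file.
--     Args:
--         data (list): list of filepath of audio snippet
--     Returns:
--         status (list): list of status of each snippet.
--     """
--     if len(data) == 1:
--         return ['single']
--
--     status = [None] * len(data)
--     for i in range(len(data)):
--         if i == 0:
--             status[i] = 'start' if data[i] == data[i + 1] else 'single'
--         elif i == len(data) - 1: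
--             status[i] = 'end' if data[i] == data[i - 1] else 'single'
--         else:
--             if data[i] != data[i - 1] and data[i] == data[i + 1]:
--                 status[i] = 'start'
--             elif data[i] == data[i - 1] and data[i] == data[i + 1]:
--                 status[i] = 'next'
--             elif data[i] == data[i - 1] and data[i] != data[i + 1]:
--                 status[i] = 'end'
--             else:
--                 status[i] = 'single'
--     return status
-- ===== SOURCE B (Python) =====
-- def get_vad_stream_status(data: list) -> list:
--     # Run-length view: split data into maximal runs of equal snippets; a run of
--     # length 1 becomes ['single'], a longer run becomes 'start', 'next'*, 'end'.
--     out = []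
--     i, n = 0, len(data)
--     while i < n:
--         j = i + 1
--         while j < n and data[j] == data[i]:
--             j += 1
--         k = j - i
--         out.extend(['single'] if k == 1 else ['start'] + ['next'] * (k - 2) + ['end'])
--         i = j
--     return out
-- ===== Notes on version B (the rewrite author's own statement) =====
-- stated objective: alternative
-- what changed: Replaced A's per-index neighbour-comparison branch chain (with a len==1 early return) by a run-length pass: B repeatedly peels the maximal leading run of equal snippets and emits 'single' for a length-1 run and 'start'+'next'*+'end' for a longer one.
import Mathlib
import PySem

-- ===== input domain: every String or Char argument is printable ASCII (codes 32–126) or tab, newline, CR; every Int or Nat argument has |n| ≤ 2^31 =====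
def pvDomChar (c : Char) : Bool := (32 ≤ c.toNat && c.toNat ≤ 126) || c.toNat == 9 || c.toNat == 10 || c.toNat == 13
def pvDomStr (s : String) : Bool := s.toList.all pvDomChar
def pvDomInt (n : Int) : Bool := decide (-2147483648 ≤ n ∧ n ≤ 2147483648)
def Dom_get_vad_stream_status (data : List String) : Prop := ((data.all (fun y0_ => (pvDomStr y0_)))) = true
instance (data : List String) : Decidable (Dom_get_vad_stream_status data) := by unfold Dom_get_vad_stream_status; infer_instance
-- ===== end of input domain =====

-- B labels snippets by run-length encoding (peel maximal equal runs, emit start/next*/end or single)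
-- instead of A's per-index neighbour-comparison branch chain (objective: alternative).


-- ===== PORT A =====
-- literal transliteration of A: len==1 early return, then 'for i in range(len(data))'
-- filling status[i] by the position branch chain (the range loop writing each slot is a map).
def get_vad_stream_status (data : List String) : List String :=
  if data.length == 1 then ["single"]
  else
    (PySem.List.pyRange 0 (data.length : Int) 1).map (fun i =>
      let get := fun (j : Int) => PySem.List.pyGetD data j ""
      if i == 0 then
        (if get i == get (i + 1) then "start" else "single")
      else if i == (data.length : Int) - 1 then
        (if get i == get (i - 1) then "end" else "single")
      else if get i != get (i - 1) && get i == get (i + 1) then "start"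
      else if get i == get (i - 1) && get i == get (i + 1) then "next"
      else if get i == get (i - 1) && get i != get (i + 1) then "end"
      else "single")

-- ===== PORT B =====
-- Source B's inner while loop: number of further elements of the leading run of x, and the rest
def pvRun (x : String) : List String → Nat × List String
  | [] => (0, [])
  | y :: ys => if y == x then ((pvRun x ys).1 + 1, (pvRun x ys).2) else (0, y :: ys)

theorem pvRun_snd_length_le (x : String) (xs : List String) : (pvRun x xs).2.length ≤ xs.length := by
  induction xs with
  | nil => simp [pvRun]
  | cons y ys ih =>
    by_cases h : (y == x) = true
    · simp [pvRun, h]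
      omega
    · simp [pvRun, h]

-- Source B's outer while loop: peel the leading run, emit its statuses, recurse on the rest
def get_vad_stream_status_alt : List String → List String
  | [] => []
  | x :: xs =>
      let k := (pvRun x xs).1 + 1
      (if k = 1 then ["single"]
       else "start" :: List.replicate (k - 2) "next" ++ ["end"])
      ++ get_vad_stream_status_alt (pvRun x xs).2
termination_by l => l.length
decreasing_by exact Nat.lt_succ_of_le (pvRun_snd_length_le x xs)

-- ===== PRECONDITION & SPEC =====
def Spec_get_vad_stream_status (data : List String) (out : List String) : Prop := out = get_vad_stream_status_alt data
instance (data : List String) (out : List String) : Decidable (Spec_get_vad_stream_status data out) := by unfold Spec_get_vad_stream_status; infer_instance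

-- ===== CLAIM (what is proved, stated in full; the proofs are below) =====
def Claim_equal_get_vad_stream_status : Prop := ∀ (data : List String), Dom_get_vad_stream_status data → Spec_get_vad_stream_status data (get_vad_stream_status data)

-- ===== LEMMAS AND PROOFS =====

-- 4-entry table on (same-as-prev, same-as-next) flags; both programs are related to `canon` below
def pvTable (sp sn : Bool) : String :=
  match sp, sn with
  | false, false => "single"
  | false, true  => "start"
  | true,  false => "end"
  | true,  true  => "next"

-- canonical middle form: one element at a time, carrying the "equal to previous" flag
def canon : Bool → List String → List String
  | _, [] => []
  | b, [_] => [pvTable b false]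
  | b, x :: y :: t => pvTable b (x == y) :: canon (x == y) (y :: t)

theorem canon_length (b : Bool) (l : List String) : (canon b l).length = l.length := by
  induction l generalizing b with
  | nil => simp [canon]
  | cons x xs ih =>
    cases xs with
    | nil => simp [canon]
    | cons y t => simp [canon, ih]

-- element i of canon, via getD (flags read off neighbours; at i=0 the prev flag is b)
theorem canon_getD (xs : List String) (x : String) (b : Bool) (i : Nat) (hi : i < xs.length + 1) :
    (canon b (x :: xs)).getD i "" =
      pvTable (if i = 0 then b else ((x :: xs).getD i "" == (x :: xs).getD (i - 1) ""))
              (decide (i + 1 < xs.length + 1) && ((x :: xs).getD i "" == (x :: xs).getD (i + 1) "")) := by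
  induction xs generalizing x b i with
  | nil =>
    have h0 : i = 0 := by simp at hi; omega
    subst h0
    simp [canon, pvTable]
  | cons y t ih =>
    cases i with
    | zero =>
      by_cases hxy : (x == y) = true <;>
        simp [canon, hxy]
    | succ j =>
      have hj : j < t.length + 1 := by simpa using hi
      have hstep : (canon b (x :: y :: t)).getD (j + 1) "" = (canon (x == y) (y :: t)).getD j "" := by
        simp [canon]
      rw [hstep, ih y (x == y) j hj]
      congr 1
      · cases j with
        | zero => simp [eq_comm]
        | succ m => simp
      · simp

-- per-index agreement of A's loop body with the flag table, for n ≠ 1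
theorem pv_body_eq (data : List String) (hn : data.length ≠ 1) (i : Int)
    (h0 : 0 ≤ i) (hlt : i < (data.length : Int)) :
    (let get := fun (j : Int) => PySem.List.pyGetD data j ""
     if i == 0 then
       (if get i == get (i + 1) then "start" else "single")
     else if i == (data.length : Int) - 1 then
       (if get i == get (i - 1) then "end" else "single")
     else if get i != get (i - 1) && get i == get (i + 1) then "start"
     else if get i == get (i - 1) && get i == get (i + 1) then "next"
     else if get i == get (i - 1) && get i != get (i + 1) then "end"
     else "single")
    = pvTable (decide (0 < i) && (PySem.List.pyGetD data i "" == PySem.List.pyGetD data (i - 1) ""))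
              (decide (i < (data.length : Int) - 1) && (PySem.List.pyGetD data i "" == PySem.List.pyGetD data (i + 1) "")) := by
  have hn2 : 2 ≤ (data.length : Int) := by omega
  by_cases hi0 : i = 0
  · subst hi0
    have hmid : 1 < data.length := by omega
    by_cases hq : PySem.List.pyGetD data 0 "" = PySem.List.pyGetD data 1 ""
    · simp [hq, hmid, pvTable]
    · simp [beq_eq_false_iff_ne.mpr hq, hmid, pvTable]
  · by_cases hil : i = (data.length : Int) - 1
    · have hne0 : ¬ ((data.length : Int) - 1 = 0) := by omega
      have h1l : 1 < data.length := by omega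
      by_cases hp : PySem.List.pyGetD data ((data.length : Int) - 1) "" = PySem.List.pyGetD data ((data.length : Int) - 1 - 1) ""
      · simp [hil, hne0, h1l, hp, pvTable]
      · simp [hil, hne0, h1l, beq_eq_false_iff_ne.mpr hp, pvTable]
    · have hpos : (0:Int) < i := by omega
      have hmid : i < (data.length : Int) - 1 := by omega
      by_cases hp : PySem.List.pyGetD data i "" = PySem.List.pyGetD data (i - 1) "" <;>
        by_cases hq : PySem.List.pyGetD data i "" = PySem.List.pyGetD data (i + 1) ""
      · have hq' : PySem.List.pyGetD data (i - 1) "" = PySem.List.pyGetD data (i + 1) "" := hp.symm.trans hq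
        simp [hi0, hil, hp, hq', hpos, hmid, pvTable]
      · have hq' : ¬ PySem.List.pyGetD data (i - 1) "" = PySem.List.pyGetD data (i + 1) "" := fun h => hq (hp.trans h)
        simp [hi0, hil, hp, hq', beq_eq_false_iff_ne.mpr hq', hpos, hmid, pvTable]
      · have hp' : ¬ PySem.List.pyGetD data (i + 1) "" = PySem.List.pyGetD data (i - 1) "" := fun h => hp (hq.trans h)
        simp [hi0, hil, hp', beq_eq_false_iff_ne.mpr hp', hq, hpos, hmid, pvTable]
      · simp [hi0, hil, beq_eq_false_iff_ne.mpr hp, beq_eq_false_iff_ne.mpr hq, hpos, hmid, pvTable]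

-- A equals the canonical form
theorem A_eq_canon (data : List String) : get_vad_stream_status data = canon false data := by
  match data with
  | [] => rfl
  | [x] => rfl
  | x :: y :: t =>
    have hn : (x :: y :: t).length ≠ 1 := by simp
    unfold get_vad_stream_status
    rw [if_neg (by simpa using hn)]
    apply List.ext_getElem
    · simp [PySem.List.length_pyRange_one, canon_length]; omega
    · intro k hk1 hk2
      have hklt : k < (x :: y :: t).length := by rwa [canon_length] at hk2
      have hkr : k < (PySem.List.pyRange 0 ((x :: y :: t).length : Int) 1).length := by
        simp only [PySem.List.length_pyRange_one]; omega
      rw [List.getElem_map]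
      have hidx : (PySem.List.pyRange 0 ((x :: y :: t).length : Int) 1)[k] = (k : Int) := by
        rw [PySem.List.getElem_pyRange_one]; ring
      rw [hidx]
      rw [pv_body_eq _ hn (k : Int) (by positivity) (by exact_mod_cast hklt)]
      rw [← List.getD_eq_getElem (canon false (x :: y :: t)) "" hk2]
      rw [canon_getD (y :: t) x false k (by simpa using hklt)]
      congr 1
      · cases k with
        | zero => simp
        | succ j =>
          have h1 : ((j + 1 : Nat) : Int) - 1 = ((j : Nat) : Int) := by push_cast; ring
          rw [h1, PySem.List.pyGetD_natCast]
          simp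
      · have h3 : (decide ((k : Int) < ((x :: y :: t).length : Int) - 1)) = decide (k + 1 < (y :: t).length + 1) :=
          decide_eq_decide.mpr (by simp only [List.length_cons]; push_cast; omega)
        rw [h3, PySem.List.pyGetD_of_nonneg _ _ (by positivity),
            PySem.List.pyGetD_of_nonneg _ _ (by positivity),
            show ((k : Int)).toNat = k from by omega,
            show ((k : Int) + 1).toNat = k + 1 from by omega]

-- canon of a run: the "inside a run" tail
theorem canon_true_run (xs : List String) (x : String) :
    canon true (x :: xs) =
      List.replicate (pvRun x xs).1 "next" ++ "end" :: canon false (pvRun x xs).2 := by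
  induction xs generalizing x with
  | nil => simp [canon, pvRun, pvTable]
  | cons y t ih =>
    by_cases h : (y == x) = true
    · have hyx : y = x := eq_of_beq h
      subst hyx
      simp [canon, pvRun, pvTable, ih y, List.replicate_succ]
    · have hxy : (x == y) = false := by
        simp only [beq_eq_false_iff_ne]; simp at h; exact fun e => h e.symm
      simp [canon, pvRun, h, hxy, pvTable]

-- canon peels a run exactly as B does
theorem canon_false_run (xs : List String) (x : String) :
    canon false (x :: xs) =
      (if (pvRun x xs).1 + 1 = 1 then ["single"]
       else "start" :: List.replicate ((pvRun x xs).1 + 1 - 2) "next" ++ ["end"])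
      ++ canon false (pvRun x xs).2 := by
  cases xs with
  | nil => simp [canon, pvRun, pvTable]
  | cons y t =>
    by_cases h : (y == x) = true
    · have hyx : y = x := eq_of_beq h
      subst hyx
      simp [canon, pvRun, pvTable, canon_true_run]
    · have hxy : (x == y) = false := by
        simp only [beq_eq_false_iff_ne]; simp at h; exact fun e => h e.symm
      simp [canon, pvRun, h, hxy, pvTable]

theorem canon_eq_alt (data : List String) : canon false data = get_vad_stream_status_alt data := by
  induction hn : data.length using Nat.strong_induction_on generalizing data with
  | _ n ih =>
    cases data with
    | nil => simp [canon, get_vad_stream_status_alt]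
    | cons x xs =>
      rw [canon_false_run]
      rw [show get_vad_stream_status_alt (x :: xs) =
            (if (pvRun x xs).1 + 1 = 1 then ["single"]
             else "start" :: List.replicate ((pvRun x xs).1 + 1 - 2) "next" ++ ["end"])
            ++ get_vad_stream_status_alt (pvRun x xs).2 from by
        simp only [get_vad_stream_status_alt]]
      congr 1
      exact ih (pvRun x xs).2.length
        (by have := pvRun_snd_length_le x xs; simp at hn; omega) _ rfl

-- ===== VERDICT (by name: the statement is the Claim_ definition above) =====
theorem get_vad_stream_status_spec : Claim_equal_get_vad_stream_status := by
  intro data _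
  show get_vad_stream_status data = get_vad_stream_status_alt data
  rw [A_eq_canon, canon_eq_alt]
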